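-- pv_equiv track=rewrite | github.com/benjamingeiger/advent-of-code | 2019/day21/part1.py | outputify
-- ===== SOURCE A (Python) =====
-- def inputify(lines):
--     output = []
--     for line in lines:
--         for char in line:
--             output.append(ord(char))
--         output.append(10)
--
--     return output
--
-- def outputify(codes):
--     output = []
--     for char in codes:
--         if 0 <= char <= 255:
--             output.append(chr(char))
--         else:
--             output.extend(outputify(inputify([str(char)])))
--     return "".join(output)
-- ===== SOURCE B (Python) =====
-- def outputify(codes):
--     parts = []
--     for char in codes:
--         if 0 <= char <= 255:
--             parts.append(chr(char))
--         else:
--             parts.append(str(char) + "\n")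
--     return "".join(parts)
-- ===== Notes on version B (the rewrite author's own statement) =====
-- stated objective: simpler
-- what changed: Replaces the self-recursion through the inputify ord/chr round-trip with a single flat loop that appends chr(c) for byte-range codes and str(c)+'\n' otherwise, dropping the inputify helper entirely.
import Mathlib
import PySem

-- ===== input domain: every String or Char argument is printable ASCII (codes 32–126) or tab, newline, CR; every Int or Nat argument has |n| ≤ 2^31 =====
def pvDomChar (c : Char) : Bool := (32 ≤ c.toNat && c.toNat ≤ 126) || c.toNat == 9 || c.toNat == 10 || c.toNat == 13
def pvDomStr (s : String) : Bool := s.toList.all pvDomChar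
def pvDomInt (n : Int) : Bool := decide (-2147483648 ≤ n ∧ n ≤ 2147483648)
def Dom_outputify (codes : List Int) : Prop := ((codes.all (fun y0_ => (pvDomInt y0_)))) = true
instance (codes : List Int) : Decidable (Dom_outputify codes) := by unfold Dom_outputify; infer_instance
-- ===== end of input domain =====

-- B replaces A's self-recursion through the inputify ord/chr round-trip with one flat loop
-- appending chr(c) or str(c)+"\n"; objective: simpler (the inputify helper is dropped).

-- ===== PORT A =====

-- "code is outside the byte range": used only by the termination measure of A's recursion
-- (the measure counts out-of-range codes; the list passed to the recursive call has none)
def pvOut (c : Int) : Bool := !(decide (0 ≤ c) && decide (c ≤ 255))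

def pvCountOut (codes : List Int) : Nat := codes.countP pvOut

-- port of A's helper inputify (ord(char) = Char.toNat, exact: Python ord is the code point)
def inputify (lines : List String) : List Int :=
  lines.foldl
    (fun output line =>
      (line.toList.foldl (fun out ch => out ++ [(ch.toNat : Int)]) output) ++ [(10 : Int)])
    []

-- every code inputify [str(c)] produces is a byte (str(c) is '-' and decimal digits), so A's
-- recursion stops after one level; cited by the decreasing_by of the mutual block below
theorem pvDigitChar_le (m : Nat) : (Nat.digitChar m).toNat ≤ 255 := by
  by_cases h : m < 16
  · interval_cases m <;> decide
  · have hstar : Nat.digitChar m = '*' := by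
      unfold Nat.digitChar
      repeat rw [if_neg (by omega)]
    rw [hstar]; decide

theorem pvToDigitsCore_mem (b : Nat) : ∀ (f n : Nat) (ds : List Char) (c : Char),
    c ∈ Nat.toDigitsCore b f n ds → c ∈ ds ∨ ∃ m, c = Nat.digitChar m := by
  intro f
  induction f with
  | zero => intro n ds c h; exact Or.inl h
  | succ f ih =>
    intro n ds c h
    simp only [Nat.toDigitsCore] at h
    by_cases hz : n / b = 0
    · rw [if_pos hz] at h
      rcases List.mem_cons.mp h with h | h
      · exact Or.inr ⟨n % b, h⟩
      · exact Or.inl h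
    · rw [if_neg hz] at h
      rcases ih _ _ _ h with h' | h'
      · rcases List.mem_cons.mp h' with h'' | h''
        · exact Or.inr ⟨n % b, h''⟩
        · exact Or.inl h''
      · exact Or.inr h'

theorem pvToChars_byte (c : Int) : ∀ ch ∈ PySem.Int.toChars c, ch.toNat ≤ 255 := by
  intro ch hch
  unfold PySem.Int.toChars Nat.toDigits at hch
  have hdig : ∀ m, ch ∈ Nat.toDigitsCore 10 m.succ m [] → ch.toNat ≤ 255 := by
    intro m hm
    rcases pvToDigitsCore_mem 10 m.succ m [] ch hm with h | ⟨k, hk⟩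
    · simp at h
    · exact hk ▸ pvDigitChar_le k
  by_cases hneg : c < 0
  · rw [if_pos hneg] at hch
    rcases List.mem_cons.mp hch with h | h
    · simp [h]
    · exact hdig _ h
  · rw [if_neg hneg] at hch
    exact hdig _ hch

theorem pvFoldlAppendMap (f : Char → Int) :
    ∀ (l : List Char) (acc : List Int),
      l.foldl (fun out ch => out ++ [f ch]) acc = acc ++ l.map f := by
  intro l
  induction l with
  | nil => simp
  | cons ch t ih => intro acc; simp [List.foldl, ih]

theorem pvInputify_single (s : String) :
    inputify [s] = s.toList.map (fun ch => (ch.toNat : Int)) ++ [(10 : Int)] := by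
  simp only [inputify, List.foldl]
  rw [pvFoldlAppendMap]
  simp

theorem pvCountOut_inputify_toStr (c : Int) : pvCountOut (inputify [PySem.Int.toStr c]) = 0 := by
  rw [pvInputify_single, pvCountOut, List.countP_eq_zero]
  intro x hx
  rw [PySem.Int.toList_toStr] at hx
  simp at hx
  rcases hx with ⟨ch, hch, hx⟩ | hx
  · have := pvToChars_byte c ch hch
    simp [pvOut, ← hx]; omega
  · simp [pvOut, hx]

-- port of A's outputify: output is the accumulated list of characters ("".join(output) at the
-- end is String.ofList; output.append(chr(char)) adds the char, output.extend(outputify(...))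
-- adds that string's characters)
mutual
def outputify (codes : List Int) : String :=
  String.ofList (outputifyChars codes)
  termination_by (pvCountOut codes, codes.length, 1)
  decreasing_by simp [Prod.lex_def]

def outputifyChars : List Int → List Char
  | [] => []
  | c :: rest =>
    if 0 ≤ c ∧ c ≤ 255 then
      Char.ofNat c.toNat :: outputifyChars rest
    else
      (outputify (inputify [PySem.Int.toStr c])).toList ++ outputifyChars rest
  termination_by codes => (pvCountOut codes, codes.length, 0)
  decreasing_by
  · rename_i h
    simp [Prod.lex_def, pvCountOut, pvOut, h]
  · rename_i h
    have h0 := pvCountOut_inputify_toStr c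
    simp only [pvCountOut] at h0
    simp [Prod.lex_def, pvCountOut, List.countP_cons, pvOut, h0]
    rw [if_pos (by omega)]
    omega
  · rename_i h
    simp [Prod.lex_def, pvCountOut, List.countP_cons, pvOut, h]
    rw [if_pos (by omega)]
    omega
end

-- ===== PORT B =====
-- one flat pass: chr(c) for byte-range codes, str(c)+"\n" otherwise, then "".join
-- (str(c)+"\n" ported by hand as list append of the chars — exact)
def outputify_alt (codes : List Int) : String :=
  PySem.Str.join (String.ofList [])
    (codes.map (fun c =>
      if 0 ≤ c ∧ c ≤ 255 then String.ofList [Char.ofNat c.toNat]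
      else String.ofList (PySem.Int.toChars c ++ ['\n'])))

-- ===== PRECONDITION & SPEC =====
def Spec_outputify (codes : List Int) (out : String) : Prop := out = outputify_alt codes
instance (codes : List Int) (out : String) : Decidable (Spec_outputify codes out) := by unfold Spec_outputify; infer_instance

-- ===== CLAIM (what is proved, stated in full; the proofs are below) =====
def Claim_equal_outputify : Prop := ∀ (codes : List Int), Dom_outputify codes → Spec_outputify codes (outputify codes)

-- ===== LEMMAS AND PROOFS =====

theorem pvOutputifyChars_all_bytes :
    ∀ (l : List Int), (∀ x ∈ l, 0 ≤ x ∧ x ≤ 255) →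
      outputifyChars l = l.map (fun c => Char.ofNat c.toNat) := by
  intro l
  induction l with
  | nil => simp [outputifyChars]
  | cons c rest ih =>
    intro h
    have hc := h c (by simp)
    rw [outputifyChars, if_pos hc, ih (fun x hx => h x (by simp [hx]))]
    simp

theorem pvOutputify_round_trip (c : Int) :
    (outputify (inputify [PySem.Int.toStr c])).toList = PySem.Int.toChars c ++ ['\n'] := by
  rw [outputify, pvInputify_single]
  have hb : ∀ x ∈ (PySem.Int.toStr c).toList.map (fun ch => (ch.toNat : Int)) ++ [(10 : Int)],
      0 ≤ x ∧ x ≤ 255 := by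
    intro x hx
    rw [PySem.Int.toList_toStr] at hx
    simp at hx
    rcases hx with ⟨ch, hch, hx⟩ | hx
    · have := pvToChars_byte c ch hch
      omega
    · omega
  rw [pvOutputifyChars_all_bytes _ hb]
  rw [PySem.Int.toList_toStr]
  simp [List.map_map]
  conv_rhs => rw [← List.map_id (PySem.Int.toChars c)]
  apply List.map_congr_left
  intro ch _
  show Char.ofNat ((ch.toNat : Int)).toNat = ch
  have h1 : ((ch.toNat : Int)).toNat = ch.toNat := by omega
  rw [h1, Char.ofNat_toNat]

theorem pvJoinNilFlatten : ∀ (parts : List (List Char)),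
    PySem.Chars.join [] parts = parts.flatten := by
  intro parts
  induction parts with
  | nil => simp [PySem.Chars.join_nil]
  | cons p ps ih =>
    cases ps with
    | nil => simp [PySem.Chars.join_singleton]
    | cons q qs =>
      rw [PySem.Chars.join_cons_cons]
      simp at ih ⊢
      exact ih

theorem pvMain (codes : List Int) :
    outputifyChars codes =
      (codes.map (fun c =>
        if 0 ≤ c ∧ c ≤ 255 then [Char.ofNat c.toNat]
        else PySem.Int.toChars c ++ ['\n'])).flatten := by
  induction codes with
  | nil => simp [outputifyChars]
  | cons c rest ih =>
    rw [outputifyChars]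
    by_cases hc : 0 ≤ c ∧ c ≤ 255
    · rw [if_pos hc, ih]; simp [hc]
    · rw [if_neg hc, ih, pvOutputify_round_trip]; simp [hc]

theorem pvAltToList (codes : List Int) :
    (outputify_alt codes).toList =
      (codes.map (fun c =>
        if 0 ≤ c ∧ c ≤ 255 then [Char.ofNat c.toNat]
        else PySem.Int.toChars c ++ ['\n'])).flatten := by
  rw [outputify_alt, PySem.Str.toList_join]
  rw [String.toList_ofList, pvJoinNilFlatten, List.map_map]
  congr 1
  apply List.map_congr_left
  intro c _
  by_cases hc : 0 ≤ c ∧ c ≤ 255 <;> simp [hc, Function.comp]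

-- ===== VERDICT (by name: the statement is the Claim_ definition above) =====
theorem outputify_spec : Claim_equal_outputify := by
  intro codes _
  unfold Spec_outputify
  have h : (outputify codes).toList = (outputify_alt codes).toList := by
    rw [outputify, pvAltToList, String.toList_ofList, pvMain codes]
  calc outputify codes = String.ofList (outputify codes).toList := by simp
    _ = String.ofList (outputify_alt codes).toList := by rw [h]
    _ = outputify_alt codes := by simp
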